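-- pv_equiv track=rewrite | github.com/CFabianPBB/program_cost_predictor | app.py | allocate_percentages
-- ===== SOURCE A (Python) =====
-- def allocate_percentages(num_items):
--     """
--     Allocate 100% among num_items in increments of 5%.
--     Returns a list of allocations (each in percentage).
--     """
--     if num_items == 0:
--         return []
--     total_increments = 20  # 100 / 5 = 20 increments
--     base = total_increments // num_items
--     remainder = total_increments % num_items
--     allocations = [base * 5 for _ in range(num_items)]
--     for i in range(remainder):
--         allocations[i] += 5
--     return allocations
-- ===== SOURCE B (Python) =====
-- def allocate_percentages(num_items):
--     """Distribute 100% in twenty 5% increments, round-robin across items."""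
--     if num_items <= 0:
--         return []
--     allocations = [0] * num_items
--     for i in range(20):
--         allocations[i % num_items] += 5
--     return allocations
-- ===== Notes on version B (the rewrite author's own statement) =====
-- stated objective: alternative
-- what changed: Replaces the base-plus-remainder computation (floor division, modulo, list of base*5 values, then a second loop adding 5 to the first remainder items) by a single round-robin loop that deals the twenty 5% increments into a zero-initialized list via i % num_items.
import Mathlib
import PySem

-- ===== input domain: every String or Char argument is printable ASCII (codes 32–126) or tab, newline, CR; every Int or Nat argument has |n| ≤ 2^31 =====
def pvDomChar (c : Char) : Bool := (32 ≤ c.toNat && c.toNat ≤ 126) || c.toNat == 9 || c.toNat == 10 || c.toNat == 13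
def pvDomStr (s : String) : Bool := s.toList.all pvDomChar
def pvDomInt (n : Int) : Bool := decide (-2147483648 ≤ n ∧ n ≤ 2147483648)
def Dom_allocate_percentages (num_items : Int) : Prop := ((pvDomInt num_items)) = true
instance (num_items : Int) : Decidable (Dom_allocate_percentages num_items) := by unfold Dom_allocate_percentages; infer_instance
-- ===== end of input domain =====

-- B replaces A's base/remainder arithmetic by a single round-robin deal of the twenty 5% increments (alternative decomposition, same cost).

-- ===== PORT A =====
def allocate_percentages (num_items : Int) : List Int :=
  if num_items = 0 then []
  else
    let base := PySem.Int.floordiv 20 num_items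
    let remainder := PySem.Int.mod 20 num_items
    let allocations := (PySem.List.pyRange 0 num_items 1).map (fun _ => base * 5)
    -- 'allocations[i] += 5': index i always satisfies 0 ≤ i < len(allocations) here
    (PySem.List.pyRange 0 remainder 1).foldl (fun acc i => acc.modify i.toNat (· + 5)) allocations

-- ===== PORT B =====
def allocate_percentages_alt (num_items : Int) : List Int :=
  if num_items ≤ 0 then []
  else
    (PySem.List.pyRange 0 20 1).foldl
      (fun acc i => acc.modify (PySem.Int.mod i num_items).toNat (· + 5))
      (List.replicate num_items.toNat 0)

-- ===== PRECONDITION & SPEC =====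
def Spec_allocate_percentages (num_items : Int) (out : List Int) : Prop := out = allocate_percentages_alt num_items
instance (num_items : Int) (out : List Int) : Decidable (Spec_allocate_percentages num_items out) := by unfold Spec_allocate_percentages; infer_instance

-- ===== CLAIM (what is proved, stated in full; the proofs are below) =====
def Claim_equal_allocate_percentages : Prop := ∀ (num_items : Int), Dom_allocate_percentages num_items → Spec_allocate_percentages num_items (allocate_percentages num_items)

-- ===== LEMMAS AND PROOFS =====

-- Both programs return [] for num_items ≤ 0 (A's ranges are then empty).
theorem allocate_nonpos (n : Int) (h : n ≤ 0) :
    allocate_percentages n = allocate_percentages_alt n := by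
  rcases eq_or_lt_of_le h with h0 | hneg
  · subst h0; decide
  · have hrem : PySem.Int.mod 20 n ≤ 0 := (PySem.Int.mod_neg_bounds 20 hneg).2
    have h1 : PySem.List.pyRange 0 n 1 = [] := by
      rw [PySem.List.pyRange_one, show (n - 0).toNat = 0 by omega]; simp
    have h2 : PySem.List.pyRange 0 (PySem.Int.mod 20 n) 1 = [] := by
      rw [PySem.List.pyRange_one, show (PySem.Int.mod 20 n - 0).toNat = 0 by omega]; simp
    simp only [allocate_percentages, allocate_percentages_alt,
      if_neg (show ¬ n = 0 by omega), if_pos h, h1, h2, List.map_nil, List.foldl_nil]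

-- For n ≥ 21: base = 0, remainder = 20, and i % n = i on the round-robin range,
-- so both folds are the same fold over range(20) starting from n zeros.
theorem allocate_big (n : Int) (h : 21 ≤ n) :
    allocate_percentages n = allocate_percentages_alt n := by
  have hbase : PySem.Int.floordiv 20 n = 0 := by
    rw [PySem.Int.floordiv_eq_iff_of_pos (by omega : (0:Int) < n)]
    constructor <;> omega
  have hrem : PySem.Int.mod 20 n = 20 := by
    have hfm := PySem.Int.floordiv_mul_add_mod 20 n
    rw [hbase] at hfm; omega
  simp only [allocate_percentages, allocate_percentages_alt,
    if_neg (show ¬ n = 0 by omega), if_neg (show ¬ n ≤ 0 by omega), hbase, hrem]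
  have hinit : (PySem.List.pyRange 0 n 1).map (fun _ => (0 : Int) * 5)
      = List.replicate n.toNat 0 := by
    simp [List.map_const', PySem.List.length_pyRange_one]
  rw [hinit]
  apply PySem.List.foldl_congr_mem
  intro acc x hx
  rw [PySem.List.mem_pyRange_one] at hx
  have hm : PySem.Int.mod x n = x := by
    rw [PySem.Int.mod_eq_emod_of_pos (by omega : (0:Int) < n)]
    exact Int.emod_eq_of_lt hx.1 (by omega)
  rw [hm]

-- ===== VERDICT (by name: the statement is the Claim_ definition above) =====
theorem allocate_percentages_spec : Claim_equal_allocate_percentages := by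
  intro n _
  unfold Spec_allocate_percentages
  rcases (show n ≤ 0 ∨ 0 < n by omega) with h | h
  · exact allocate_nonpos n h
  · rcases (show n ≤ 20 ∨ 21 ≤ n by omega) with h20 | h21
    · -- 1 ≤ n ≤ 20: finitely many small cases
      interval_cases n <;> decide
    · exact allocate_big n h21
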